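-- pv_equiv track=rewrite | github.com/Jan21/BranchingTokens | src/transformations.py | cumsum_reverse
-- ===== SOURCE A (Python) =====
-- from typing import Callable, List, Union
--
-- def _format_vec(vec: List[int]) -> str:
--     """Format vector as [ a b c ] with spaces."""
--     return "[ " + " ".join(str(x) for x in vec) + " ]"
--
-- def cumsum_reverse(vec: List[int], k: int, trace: List[str]) -> List[int]:
--     """Cumulative sum from right with mod k."""
--     reversed_vec = vec[::-1]
--     result = []
--     running = 0
--     ops = []
--     for i, x in enumerate(reversed_vec):
--         if i == 0:
--             result.append(x % k)
--             ops.append(str(x % k))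
--         else:
--             new_val = (running + x) % k
--             ops.append(f"{running} + {x} = {new_val}")
--             result.append(new_val)
--         running = result[-1]
--     result = result[::-1]
--     trace.append(f"cumsum_reverse : {' , '.join(ops)} : {_format_vec(result)}")
--     return result
-- ===== SOURCE B (Python) =====
-- from typing import List
--
-- def _format_vec(vec: List[int]) -> str:
--     return "[ " + " ".join(str(x) for x in vec) + " ]"
--
-- def cumsum_reverse(vec: List[int], k: int, trace: List[str]) -> List[int]:
--     """Reverse cumulative sum mod k, computed FORWARD: keep the remaining
--     suffix sum and mod it, then format the trace in a separate second pass."""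
--     rem = sum(vec)
--     result = []
--     for x in vec:
--         result.append(rem % k)
--         rem -= x
--     rr = result[::-1]
--     rv = vec[::-1]
--     ops = [str(rr[0])] if rr else []
--     for j in range(1, len(rr)):
--         ops.append(f"{rr[j-1]} + {rv[j]} = {rr[j]}")
--     trace.append(f"cumsum_reverse : {' , '.join(ops)} : {_format_vec(result)}")
--     return result
-- ===== Notes on version B (the rewrite author's own statement) =====
-- stated objective: alternative
-- what changed: A builds the result in one left-to-right loop over the reversed vector with an i==0 branch and a running (already-modded) accumulator, interleaving trace formatting; B never reverses for the computation: it takes the total sum once, walks the original list forward emitting (remaining suffix sum) % k while subtracting each element, and formats the trace in a separate second pass over the finished result (equal because Python's % is a congruence).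
import Mathlib
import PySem

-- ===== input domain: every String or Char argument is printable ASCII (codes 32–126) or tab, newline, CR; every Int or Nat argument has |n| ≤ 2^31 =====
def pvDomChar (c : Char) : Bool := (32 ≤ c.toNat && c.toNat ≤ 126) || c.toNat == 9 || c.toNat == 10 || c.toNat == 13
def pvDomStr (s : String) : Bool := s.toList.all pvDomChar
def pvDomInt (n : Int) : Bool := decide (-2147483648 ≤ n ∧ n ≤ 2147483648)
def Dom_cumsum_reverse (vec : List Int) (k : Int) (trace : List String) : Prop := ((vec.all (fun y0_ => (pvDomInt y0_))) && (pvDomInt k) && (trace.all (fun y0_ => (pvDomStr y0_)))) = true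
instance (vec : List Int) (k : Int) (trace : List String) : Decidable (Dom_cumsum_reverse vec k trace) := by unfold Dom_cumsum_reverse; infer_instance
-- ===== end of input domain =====

-- B replaces A's loop over the reversed vector (i==0 branch + running accumulator + interleaved
-- trace formatting) by a forward pass that mods the remaining suffix sum, with trace formatting
-- as a separate second pass; the equivalence proved is about the RETURN value (both Pythons
-- append the identical trace line, but that side effect is not modelled here).

-- ===== PORT A =====
-- the loop body of A, branching on i == 0 exactly as A does; running := result[-1] = the value just appended
def cumsumStepA (k : Int) (st : List Int × Int) (p : Int × Int) : List Int × Int :=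
  if p.1 = 0 then
    (st.1 ++ [PySem.Int.mod p.2 k], PySem.Int.mod p.2 k)
  else
    (st.1 ++ [PySem.Int.mod (st.2 + p.2) k], PySem.Int.mod (st.2 + p.2) k)

def cumsum_reverse (vec : List Int) (k : Int) (trace : List String) : List Int :=
  -- vec[::-1] is List.reverse; the trace string built by A is a side effect not modelled (return value only)
  let reversed_vec := vec.reverse
  let st := (PySem.List.enumerate reversed_vec 0).foldl (cumsumStepA k) ([], 0)
  st.1.reverse

-- ===== PORT B =====
-- Source B's computation loop: state (result, rem); append rem % k, then rem -= x
def cumsum_reverse_alt (vec : List Int) (k : Int) (trace : List String) : List Int :=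
  let st := vec.foldl (fun (st : List Int × Int) (x : Int) =>
    (st.1 ++ [PySem.Int.mod st.2 k], st.2 - x)) ([], vec.sum)
  st.1   -- Source B's second pass only builds the appended trace string (side effect, not modelled)

-- ===== PRECONDITION & SPEC =====
-- Pre_ excludes exactly the inputs where Python A raises ZeroDivisionError (x % 0 on a nonempty vec).
def Pre_cumsum_reverse (vec : List Int) (k : Int) (trace : List String) : Prop :=
  vec = [] ∨ k ≠ 0
instance (vec : List Int) (k : Int) (trace : List String) : Decidable (Pre_cumsum_reverse vec k trace) := by
  unfold Pre_cumsum_reverse; infer_instance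

def pvWitness_cumsum_reverse : List Int × Int × List String := ([3, -1, 4], 5, ["t"])

def Spec_cumsum_reverse (vec : List Int) (k : Int) (trace : List String) (out : List Int) : Prop := out = cumsum_reverse_alt vec k trace
instance (vec : List Int) (k : Int) (trace : List String) (out : List Int) : Decidable (Spec_cumsum_reverse vec k trace out) := by unfold Spec_cumsum_reverse; infer_instance

-- ===== CLAIM (what is proved, stated in full; the proofs are below) =====
def Claim_equal_cumsum_reverse : Prop := ∀ (vec : List Int) (k : Int) (trace : List String), Dom_cumsum_reverse vec k trace → Pre_cumsum_reverse vec k trace → Spec_cumsum_reverse vec k trace (cumsum_reverse vec k trace)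

-- ===== LEMMAS AND PROOFS =====

-- Python's % is a congruence: replacing the left summand by its residue does not change the result.
theorem pymod_add_left (a x k : Int) (hk : k ≠ 0) :
    PySem.Int.mod (PySem.Int.mod a k + x) k = PySem.Int.mod (a + x) k := by
  have ha := PySem.Int.floordiv_mul_add_mod a k
  have h2 := PySem.Int.floordiv_mul_add_mod (PySem.Int.mod a k + x) k
  have h3 := PySem.Int.floordiv_mul_add_mod (a + x) k
  have hdvd : k ∣ (PySem.Int.mod (a + x) k - PySem.Int.mod (PySem.Int.mod a k + x) k) := by
    refine ⟨PySem.Int.floordiv a k + PySem.Int.floordiv (PySem.Int.mod a k + x) k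
      - PySem.Int.floordiv (a + x) k, ?_⟩
    nlinarith [ha, h2, h3]
  obtain ⟨c, hc⟩ := hdvd
  rcases lt_or_gt_of_ne hk with hneg | hpos
  · obtain ⟨b1l, b1u⟩ := PySem.Int.mod_neg_bounds (a := PySem.Int.mod a k + x) hneg
    obtain ⟨b2l, b2u⟩ := PySem.Int.mod_neg_bounds (a := a + x) hneg
    have hc0 : c = 0 := by nlinarith
    rw [hc0, mul_zero] at hc; omega
  · have b1l := PySem.Int.mod_nonneg (a := PySem.Int.mod a k + x) hpos
    have b1u := PySem.Int.mod_lt (a := PySem.Int.mod a k + x) hpos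
    have b2l := PySem.Int.mod_nonneg (a := a + x) hpos
    have b2u := PySem.Int.mod_lt (a := a + x) hpos
    have hc0 : c = 0 := by nlinarith
    rw [hc0, mul_zero] at hc; omega

-- 0 % k == 0 in Python
theorem pymod_zero (k : Int) (hk : k ≠ 0) : PySem.Int.mod 0 k = 0 :=
  (PySem.Int.mod_eq_zero_iff_dvd 0 k).mpr (dvd_zero k)

-- the recurrence both programs satisfy, stated as structural recursion on the original list
def cumsumGo (k : Int) : List Int → List Int
  | [] => []
  | x :: xs =>
    PySem.Int.mod ((cumsumGo k xs).headD 0 + x) k :: cumsumGo k xs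

-- the uniform forward build A's loop performs once the i == 0 case is absorbed (x % k = (0 + x) % k)
def buildA (k : Int) (run : Int) : List Int → List Int
  | [] => []
  | x :: xs => PySem.Int.mod (run + x) k :: buildA k (PySem.Int.mod (run + x) k) xs

theorem foldA_tail (k : Int) : ∀ (m : List Int) (s : Int), 1 ≤ s → ∀ (acc : List Int) (run : Int),
    (PySem.List.enumerate m s).foldl (cumsumStepA k) (acc, run)
      = (acc ++ buildA k run m, (buildA k run m).getLastD run) := by
  intro m
  induction m with
  | nil => intro s hs acc run; simp [PySem.List.enumerate_nil, buildA]
  | cons x xs ih =>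
    intro s hs acc run
    rw [PySem.List.enumerate_cons]
    have hne : ¬ ((s, x).1 = 0) := by simp; omega
    simp only [List.foldl_cons, cumsumStepA, if_neg hne]
    rw [ih (s + 1) (by omega)]
    simp [buildA, ← List.getLastD_eq_getLast?, List.getLastD_cons]

theorem foldA_all (k : Int) (m : List Int) :
    ((PySem.List.enumerate m 0).foldl (cumsumStepA k) ([], 0)).1 = buildA k 0 m := by
  cases m with
  | nil => simp [PySem.List.enumerate_nil, buildA]
  | cons y t =>
    rw [PySem.List.enumerate_cons]
    simp only [List.foldl_cons, cumsumStepA, if_true, zero_add]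
    rw [foldA_tail k t 1 (by omega)]
    have h0 : PySem.Int.mod y k = PySem.Int.mod (0 + y) k := by rw [Int.zero_add]
    simp [buildA, h0]

theorem buildA_concat (k : Int) : ∀ (a : List Int) (run x : Int),
    buildA k run (a ++ [x])
      = buildA k run a ++ [PySem.Int.mod ((buildA k run a).getLastD run + x) k] := by
  intro a
  induction a with
  | nil => intro run x; simp [buildA]
  | cons y t ih =>
    intro run x
    simp only [List.cons_append, buildA, ih, List.getLastD_cons]

theorem getLastD_reverse_headD (r : List Int) (d : Int) : r.reverse.getLastD d = r.headD d := by
  cases r with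
  | nil => rfl
  | cons a t =>
    simp [List.getLastD_eq_getLast?, List.getLast?_reverse]

theorem buildA_reverse_eq_go (k : Int) : ∀ (l : List Int),
    buildA k 0 l.reverse = (cumsumGo k l).reverse := by
  intro l
  induction l with
  | nil => rfl
  | cons x xs ih =>
    rw [List.reverse_cons, buildA_concat, ih, getLastD_reverse_headD]
    simp [cumsumGo]

theorem a_eq_go (vec : List Int) (k : Int) (trace : List String) :
    cumsum_reverse vec k trace = cumsumGo k vec := by
  unfold cumsum_reverse
  simp only []
  rw [foldA_all, buildA_reverse_eq_go, List.reverse_reverse]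

-- head of the recurrence's result is the suffix sum's residue
theorem go_headD (k : Int) (hk : k ≠ 0) : ∀ (xs : List Int),
    (cumsumGo k xs).headD 0 = PySem.Int.mod xs.sum k := by
  intro xs
  induction xs with
  | nil => simp [cumsumGo, pymod_zero k hk]
  | cons x t ih =>
    rw [show (cumsumGo k (x :: t)).headD 0
        = PySem.Int.mod ((cumsumGo k t).headD 0 + x) k from rfl]
    rw [ih, pymod_add_left _ _ _ hk]
    congr 1
    rw [List.sum_cons]; ring

-- B's forward loop, as structural recursion on (list, remaining suffix sum)
def fwdB (k : Int) : List Int → Int → List Int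
  | [], _ => []
  | x :: xs, rem => PySem.Int.mod rem k :: fwdB k xs (rem - x)

theorem foldB_eq_fwd (k : Int) : ∀ (l : List Int) (acc : List Int) (rem : Int),
    (l.foldl (fun (st : List Int × Int) (x : Int) =>
      (st.1 ++ [PySem.Int.mod st.2 k], st.2 - x)) (acc, rem)).1 = acc ++ fwdB k l rem := by
  intro l
  induction l with
  | nil => intro acc rem; simp [fwdB]
  | cons x xs ih =>
    intro acc rem
    simp only [List.foldl_cons, fwdB]
    rw [ih]
    simp

theorem fwd_eq_go (k : Int) (hk : k ≠ 0) : ∀ (l : List Int), fwdB k l l.sum = cumsumGo k l := by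
  intro l
  induction l with
  | nil => rfl
  | cons x t ih =>
    have hrem : (x :: t).sum - x = t.sum := by rw [List.sum_cons]; ring
    rw [show fwdB k (x :: t) (x :: t).sum
        = PySem.Int.mod (x :: t).sum k :: fwdB k t ((x :: t).sum - x) from rfl, hrem, ih]
    rw [show cumsumGo k (x :: t)
        = PySem.Int.mod ((cumsumGo k t).headD 0 + x) k :: cumsumGo k t from rfl]
    rw [go_headD k hk, pymod_add_left _ _ _ hk]
    congr 1
    rw [List.sum_cons]; ring

-- ===== VERDICT (by name: the statement is the Claim_ definition above) =====
theorem cumsum_reverse_spec : Claim_equal_cumsum_reverse := by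
  intro vec k trace _ hpre
  unfold Spec_cumsum_reverse cumsum_reverse_alt
  simp only []
  rw [foldB_eq_fwd, List.nil_append, a_eq_go]
  rcases hpre with hnil | hk
  · subst hnil; rfl
  · rw [fwd_eq_go k hk]
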